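-- pv_equiv track=rewrite | github.com/aitechnav/Sentinel_Guard | sentinelguard/adversarial/__init__.py | _replace_leetspeak
-- ===== SOURCE A (Python) =====
-- from typing import Any, Dict, List, Optional, Set, Tuple
--
-- LEETSPEAK_MAP: Dict[str, str] = {
--     "4": "a", "@": "a", "8": "b", "(": "c", "3": "e",
--     "6": "g", "#": "h", "1": "i", "!": "i", "|": "l",
--     "0": "o", "5": "s", "7": "t", "+": "t",
-- }
--
-- def _replace_leetspeak(text: str) -> str:
--     """Replace leetspeak characters with letters."""
--     result = []
--     for i, char in enumerate(text):
--         if char in LEETSPEAK_MAP: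
--             # Context check: only replace if surrounded by alpha
--             before = text[i - 1].isalpha() if i > 0 else False
--             after = text[i + 1].isalpha() if i < len(text) - 1 else False
--             if before or after:
--                 result.append(LEETSPEAK_MAP[char])
--                 continue
--         result.append(char)
--     return "".join(result)
-- ===== SOURCE B (Python) =====
-- LEETSPEAK_MAP = {
--     "4": "a", "@": "a", "8": "b", "(": "c", "3": "e",
--     "6": "g", "#": "h", "1": "i", "!": "i", "|": "l",
--     "0": "o", "5": "s", "7": "t", "+": "t",
-- }
--
-- def _replace_leetspeak(text: str) -> str:
--     """Replace leetspeak characters with letters (segment-based).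
--
--     Split the text into maximal runs of alpha / non-alpha characters.  A
--     leetspeak character is non-alpha, so it touches a letter exactly when it
--     is the FIRST char of a non-alpha run that follows an alpha run, or the
--     LAST char of a non-alpha run that precedes one; interior characters of a
--     run are never replaced, and alpha runs are copied wholesale.
--     """
--     segs = []
--     i, n = 0, len(text)
--     while i < n:
--         j = i + 1
--         a = text[i].isalpha()
--         while j < n and text[j].isalpha() == a:
--             j += 1
--         segs.append(text[i:j])
--         i = j
--     pieces = []
--     last = len(segs) - 1
--     for k, seg in enumerate(segs):
--         if seg[0].isalpha():
--             pieces.append(seg)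
--         else:
--             chars = list(seg)
--             if k > 0 and chars[0] in LEETSPEAK_MAP:
--                 chars[0] = LEETSPEAK_MAP[chars[0]]
--             if k < last and chars[-1] in LEETSPEAK_MAP:
--                 chars[-1] = LEETSPEAK_MAP[chars[-1]]
--             pieces.append("".join(chars))
--     return "".join(pieces)
-- ===== Notes on version B (the rewrite author's own statement) =====
-- stated objective: alternative
-- what changed: B splits the text into maximal runs of alpha/non-alpha characters and edits only the first and last character of interior non-alpha runs (the only positions that can touch a letter), copying alpha runs and run interiors wholesale, instead of A's per-character loop that tests the dictionary and probes both neighbours at every index.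
import Mathlib
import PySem

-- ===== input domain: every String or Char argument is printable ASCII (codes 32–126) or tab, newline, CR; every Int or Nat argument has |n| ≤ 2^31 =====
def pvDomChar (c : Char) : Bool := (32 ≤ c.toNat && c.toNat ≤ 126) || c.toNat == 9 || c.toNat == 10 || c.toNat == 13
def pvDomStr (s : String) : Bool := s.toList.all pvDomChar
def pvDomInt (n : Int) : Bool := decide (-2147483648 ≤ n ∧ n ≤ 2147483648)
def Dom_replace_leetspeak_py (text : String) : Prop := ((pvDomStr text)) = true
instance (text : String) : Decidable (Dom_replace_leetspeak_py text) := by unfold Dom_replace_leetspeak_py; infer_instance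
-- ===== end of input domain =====

-- B replaces A's per-character loop (dictionary test + two neighbour probes at every
-- index) by a segment algorithm: split into maximal alpha/non-alpha runs and edit only
-- the first/last character of interior non-alpha runs (alternative, same O(n) cost).


-- module-level constant LEETSPEAK_MAP (dict with single-char keys → Char assoc list)
def LEETSPEAK_MAP : List (Char × Char) :=
  [('4','a'), ('@','a'), ('8','b'), ('(','c'), ('3','e'),
   ('6','g'), ('#','h'), ('1','i'), ('!','i'), ('|','l'),
   ('0','o'), ('5','s'), ('7','t'), ('+','t')]

-- ===== PORT A =====
-- literal transliteration: for i, char in enumerate(text) with guarded text[i±1] lookups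
def replace_leetspeak_py (text : String) : String :=
  let cs := text.toList
  let result : List Char :=
    (PySem.List.enumerate cs 0).foldl (fun acc (p : Int × Char) =>
      match LEETSPEAK_MAP.lookup p.2 with
      | some r =>
          let before : Bool :=
            if 0 < p.1 then
              (match PySem.List.pyGet? cs (p.1 - 1) with
               | some ch => PySem.Chars.isalpha ch
               | none => false)
            else false
          let after : Bool :=
            if p.1 < (cs.length : Int) - 1 then
              (match PySem.List.pyGet? cs (p.1 + 1) with
               | some ch => PySem.Chars.isalpha ch
               | none => false)
            else false
          if before || after then acc ++ [r] else acc ++ [p.2]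
      | none => acc ++ [p.2]) []
  String.ofList result

-- ===== PORT B =====
-- Source B's while-loop that scans off the maximal run of characters with the same
-- isalpha-ness as the head (inner 'while j < n and text[j].isalpha() == a: j += 1')
def pvLeetChunk (cs : List Char) : List (List Char) :=
  match cs with
  | [] => []
  | c :: rest =>
      (c :: rest.takeWhile (fun d => PySem.Chars.isalpha d == PySem.Chars.isalpha c)) ::
        pvLeetChunk (rest.dropWhile (fun d => PySem.Chars.isalpha d == PySem.Chars.isalpha c))
termination_by cs.length
decreasing_by
  simp only [List.length_cons]
  exact Nat.lt_succ_of_le (List.length_dropWhile_le _ _)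

-- the body of Source B's 'for k, seg in enumerate(segs)' loop: edit the first/last char
-- of a non-alpha run (only when k > 0 / k < last), copy alpha runs
def pvEditSeg (last : Int) (p : Int × List Char) : List Char :=
  match p.2 with
  | [] => []
  | c :: restSeg =>
    if PySem.Chars.isalpha c then c :: restSeg
    else
      let chars := if 0 < p.1 then
          (match LEETSPEAK_MAP.lookup c with
           | some r => r :: restSeg
           | none => c :: restSeg)
        else c :: restSeg
      if p.1 < last then
        (match chars.getLast? with
         | some lc =>
             (match LEETSPEAK_MAP.lookup lc with
              | some r => chars.dropLast ++ [r]
              | none => chars)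
         | none => chars)
      else chars

-- literal transliteration of Source B: chunk into runs, then edit only the first/last
-- char of non-alpha runs (k > 0 / k < last), and join the pieces
def replace_leetspeak_py_alt (text : String) : String :=
  let segs := pvLeetChunk text.toList
  String.ofList (((PySem.List.enumerate segs 0).map (pvEditSeg ((segs.length : Int) - 1))).flatten)

-- ===== PRECONDITION & SPEC =====
def Spec_replace_leetspeak_py (text : String) (out : String) : Prop := out = replace_leetspeak_py_alt text
instance (text : String) (out : String) : Decidable (Spec_replace_leetspeak_py text out) := by unfold Spec_replace_leetspeak_py; infer_instance

-- ===== CLAIM (what is proved, stated in full; the proofs are below) =====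
def Claim_equal_replace_leetspeak_py : Prop := ∀ (text : String), Dom_replace_leetspeak_py text → Spec_replace_leetspeak_py text (replace_leetspeak_py text)

-- ===== LEMMAS AND PROOFS =====

-- the per-position value A computes at index i on character c
def aStep (cs : List Char) (p : Int × Char) : Char :=
  match LEETSPEAK_MAP.lookup p.2 with
  | some r =>
      let before : Bool :=
        if 0 < p.1 then
          (match PySem.List.pyGet? cs (p.1 - 1) with
           | some ch => PySem.Chars.isalpha ch
           | none => false)
        else false
      let after : Bool :=
        if p.1 < (cs.length : Int) - 1 then
          (match PySem.List.pyGet? cs (p.1 + 1) with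
           | some ch => PySem.Chars.isalpha ch
           | none => false)
        else false
      if before || after then r else p.2
  | none => p.2

theorem aFold_eq_map (cs : List Char) (l : List (Int × Char)) (acc : List Char) :
    l.foldl (fun acc p =>
      match LEETSPEAK_MAP.lookup p.2 with
      | some r =>
          let before : Bool :=
            if 0 < p.1 then
              (match PySem.List.pyGet? cs (p.1 - 1) with
               | some ch => PySem.Chars.isalpha ch
               | none => false)
            else false
          let after : Bool :=
            if p.1 < (cs.length : Int) - 1 then
              (match PySem.List.pyGet? cs (p.1 + 1) with
               | some ch => PySem.Chars.isalpha ch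
               | none => false)
            else false
          if before || after then acc ++ [r] else acc ++ [p.2]
      | none => acc ++ [p.2]) acc = acc ++ l.map (aStep cs) := by
  induction l generalizing acc with
  | nil => simp
  | cons p l ih =>
      simp only [List.foldl_cons, List.map_cons]
      rw [ih]
      cases h : LEETSPEAK_MAP.lookup p.2 with
      | none => simp [aStep, h]
      | some r =>
          simp only [aStep, h]
          split_ifs <;> simp_all

-- the shared reference recursion: one pass carrying the previous char's isalpha bit
-- and peeking at the next char
def pvStep (prev : Bool) (c : Char) (next : Bool) : Char :=
  match LEETSPEAK_MAP.lookup c with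
  | some r => if prev || next then r else c
  | none => c

def pvHeadAlpha : List Char → Bool
  | [] => false
  | d :: _ => PySem.Chars.isalpha d

def pvGo (prev : Bool) : List Char → List Char
  | [] => []
  | c :: rest => pvStep prev c (pvHeadAlpha rest) :: pvGo (PySem.Chars.isalpha c) rest

theorem pvGo_cons (prev : Bool) (c : Char) (rest : List Char) :
    pvGo prev (c :: rest) = pvStep prev c (pvHeadAlpha rest) :: pvGo (PySem.Chars.isalpha c) rest := rfl

-- facts about the leetspeak dictionary: keys are never letters, values always are
theorem lookup_mem {α : Type} [BEq α] [LawfulBEq α] {β : Type} :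
    ∀ (l : List (α × β)) (c : α) (r : β), l.lookup c = some r → (c, r) ∈ l := by
  intro l
  induction l with
  | nil => intro c r h; simp [List.lookup] at h
  | cons p l ih =>
      intro c r h
      simp only [List.lookup] at h
      rcases hc : c == p.1 with _ | _
      · rw [hc] at h
        exact List.mem_cons_of_mem _ (ih c r h)
      · rw [hc] at h
        have : c = p.1 := by simpa using hc
        cases h
        simp [this]

theorem lk_alpha_none (c : Char) (h : PySem.Chars.isalpha c = true) :
    LEETSPEAK_MAP.lookup c = none := by
  cases hlk : LEETSPEAK_MAP.lookup c with
  | none => rfl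
  | some r =>
      have hm := lookup_mem _ _ _ hlk
      simp only [LEETSPEAK_MAP, List.mem_cons, List.not_mem_nil, or_false, Prod.mk.injEq] at hm
      rcases hm with ⟨h1, _⟩|⟨h1, _⟩|⟨h1, _⟩|⟨h1, _⟩|⟨h1, _⟩|⟨h1, _⟩|⟨h1, _⟩|⟨h1, _⟩|⟨h1, _⟩|⟨h1, _⟩|⟨h1, _⟩|⟨h1, _⟩|⟨h1, _⟩|⟨h1, _⟩ <;>
        (subst h1; exact absurd h (by decide))

theorem lk_some_alpha (c r : Char) (h : LEETSPEAK_MAP.lookup c = some r) :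
    PySem.Chars.isalpha r = true := by
  have hm := lookup_mem _ _ _ h
  simp only [LEETSPEAK_MAP, List.mem_cons, List.not_mem_nil, or_false, Prod.mk.injEq] at hm
  rcases hm with ⟨_, h2⟩|⟨_, h2⟩|⟨_, h2⟩|⟨_, h2⟩|⟨_, h2⟩|⟨_, h2⟩|⟨_, h2⟩|⟨_, h2⟩|⟨_, h2⟩|⟨_, h2⟩|⟨_, h2⟩|⟨_, h2⟩|⟨_, h2⟩|⟨_, h2⟩ <;>
    (subst h2; decide)

-- ===== A = pvGo false =====
theorem pvGo_length : ∀ (cs : List Char) (prev : Bool), (pvGo prev cs).length = cs.length := by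
  intro cs
  induction cs with
  | nil => intro _; rfl
  | cons c rest ih => intro prev; simp [pvGo, ih]

theorem pvGo_getElem : ∀ (cs : List Char) (prev : Bool) (i : Nat) (h : i < cs.length),
    (pvGo prev cs)[i]'(by rw [pvGo_length]; exact h) =
      pvStep (if i = 0 then prev else PySem.Chars.isalpha (cs.getD (i-1) ' '))
        (cs[i]) (PySem.Chars.isalpha (cs.getD (i+1) ' ')) := by
  intro cs
  induction cs with
  | nil => intro _ i h; simp at h
  | cons c rest ih =>
      intro prev i h
      cases i with
      | zero =>
          simp only [pvGo, List.getElem_cons_zero, List.getD_cons_zero, if_pos rfl,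
            List.getD_cons_succ]
          congr 1
          cases rest with
          | nil => simp [pvHeadAlpha, List.getD]; decide
          | cons d rest' => simp [pvHeadAlpha]
      | succ j =>
          have hj : j < rest.length := by simpa using h
          have := ih (PySem.Chars.isalpha c) j hj
          simp only [pvGo, List.getElem_cons_succ, List.getD_cons_succ] at this ⊢
          rw [this]
          congr 1
          cases j with
          | zero => simp
          | succ j' => simp

theorem A_map_eq_go (cs : List Char) :
    (PySem.List.enumerate cs 0).map (aStep cs) = pvGo false cs := by
  apply List.ext_getElem
  · simp [PySem.List.length_enumerate, pvGo_length]
  · intro i h1 h2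
    have hn : i < cs.length := by simpa [PySem.List.length_enumerate] using h1
    rw [pvGo_getElem cs false i hn]
    simp only [List.getElem_map, PySem.List.getElem_enumerate]
    have hA_bef : (if 0 < (0 : Int) + i then
          (match PySem.List.pyGet? cs ((0 : Int) + i - 1) with
           | some ch => PySem.Chars.isalpha ch
           | none => false)
        else false) =
        (if i = 0 then false else PySem.Chars.isalpha (cs.getD (i-1) ' ')) := by
      by_cases h0 : i = 0
      · subst h0; simp
      · have hc : (0 : Int) + i - 1 = ((i - 1 : Nat) : Int) := by omega
        rw [if_pos (by omega), hc, PySem.List.pyGet?_natCast]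
        have hlt : i - 1 < cs.length := by omega
        have : cs[i-1]? = some (cs[i-1]'hlt) := List.getElem?_eq_getElem hlt
        rw [if_neg h0]
        simp [List.getD, this]
    have hA_aft : (if (0 : Int) + i < (cs.length : Int) - 1 then
          (match PySem.List.pyGet? cs ((0 : Int) + i + 1) with
           | some ch => PySem.Chars.isalpha ch
           | none => false)
        else false) =
        PySem.Chars.isalpha (cs.getD (i+1) ' ') := by
      by_cases ha : i + 1 < cs.length
      · have hc : (0 : Int) + i + 1 = ((i + 1 : Nat) : Int) := by omega
        rw [if_pos (by omega), hc, PySem.List.pyGet?_natCast]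
        have : cs[i+1]? = some (cs[i+1]'ha) := List.getElem?_eq_getElem ha
        simp [List.getD, this]
      · rw [if_neg (by omega)]
        rw [List.getD_eq_default _ _ (by omega)]
        decide
    unfold aStep pvStep
    cases hl : LEETSPEAK_MAP.lookup cs[i] with
    | none => simp
    | some r => simp only [hA_bef, hA_aft]

-- ===== B = pvGo false =====
-- editing the last character of a run (the 'if k < last' edit of Source B)
def pvEditLast (notLast : Bool) (chars : List Char) : List Char :=
  if notLast then
    match chars.getLast? with
    | some lc =>
        (match LEETSPEAK_MAP.lookup lc with
         | some r => chars.dropLast ++ [r]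
         | none => chars)
    | none => chars
  else chars

-- the edited segment list as B computes it, with nf = "this is not the first segment"
def pvE (nf : Bool) : List (List Char) → List Char
  | [] => []
  | seg :: rest =>
      (match seg with
       | [] => []
       | c :: restSeg =>
         if PySem.Chars.isalpha c then c :: restSeg
         else pvEditLast (!rest.isEmpty)
           (if nf then
              (match LEETSPEAK_MAP.lookup c with
               | some r => r :: restSeg
               | none => c :: restSeg)
            else c :: restSeg)) ++ pvE true rest

theorem pvE_cons (nf : Bool) (seg : List Char) (rest : List (List Char)) :
    pvE nf (seg :: rest) =
      (match seg with
       | [] => []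
       | c :: restSeg =>
         if PySem.Chars.isalpha c then c :: restSeg
         else pvEditLast (!rest.isEmpty)
           (if nf then
              (match LEETSPEAK_MAP.lookup c with
               | some r => r :: restSeg
               | none => c :: restSeg)
            else c :: restSeg)) ++ pvE true rest := rfl

theorem pvE_cons' (nf : Bool) (c : Char) (restSeg : List Char) (rest : List (List Char)) :
    pvE nf ((c :: restSeg) :: rest) =
      (if PySem.Chars.isalpha c then c :: restSeg
       else pvEditLast (!rest.isEmpty)
         (if nf then
            (match LEETSPEAK_MAP.lookup c with
             | some r => r :: restSeg
             | none => c :: restSeg)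
          else c :: restSeg)) ++ pvE true rest := rfl

theorem B_enum_eq_E : ∀ (l : List (List Char)) (k : Nat) (last : Int),
    last = (k : Int) + l.length - 1 →
    ((PySem.List.enumerate l (k : Int)).map (pvEditSeg last)).flatten = pvE (decide (0 < k)) l := by
  intro l
  induction l with
  | nil => intro k last _; simp [pvE]
  | cons seg rest ih =>
      intro k last hlast
      rw [PySem.List.enumerate_cons, List.map_cons, List.flatten_cons]
      have hk1 : ((k : Int) + 1) = ((k + 1 : Nat) : Int) := by push_cast; ring
      rw [hk1, ih (k+1) last (by simp at hlast ⊢; omega)]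
      have hnf : decide (0 < k + 1) = true := by simp
      rw [hnf]
      show _ = pvE (decide (0 < k)) (seg :: rest)
      rw [pvE_cons]
      congr 1
      unfold pvEditSeg
      cases seg with
      | nil => rfl
      | cons c restSeg =>
          by_cases hA : PySem.Chars.isalpha c = true
          · simp [hA]
          · simp only [Bool.not_eq_true] at hA
            simp only [hA, Bool.false_eq_true, if_neg, reduceIte]
            have h0 : ((0 : Int) < (k : Int)) = (0 < k) := by simp
            have hlt : (((k : Int)) < last) = ¬rest.isEmpty := by
              simp only [List.length_cons] at hlast
              cases rest with
              | nil => simp at hlast ⊢; omega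
              | cons s r => simp at hlast ⊢; omega
            unfold pvEditLast
            by_cases hne : rest.isEmpty
            · rw [if_neg (by rw [hlt]; simp [hne]), hne]
              simp only [Bool.not_true, Bool.false_eq_true, if_neg, reduceIte]
              by_cases h0' : 0 < k <;> simp [h0']
            · rw [if_pos (by rw [hlt]; simp [hne])]
              rw [Bool.not_eq_true] at hne
              rw [hne]
              simp only [Bool.not_false, if_pos, reduceIte]
              by_cases h0' : 0 < k <;> simp [h0']

-- interior non-alpha run: pvGo over it touches only the last char
theorem go_nonalpha_mid : ∀ (l rest' : List Char),
    (∀ x ∈ l, PySem.Chars.isalpha x = false) →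
    pvGo false (l ++ rest') = pvEditLast (pvHeadAlpha rest') l ++ pvGo false rest' := by
  intro l
  induction l with
  | nil => intro rest' _; simp [pvEditLast, pvGo]
  | cons x l ih =>
      intro rest' hall
      have hx : PySem.Chars.isalpha x = false := hall x (by simp)
      cases l with
      | nil =>
          simp only [List.nil_append, List.singleton_append, pvGo, hx]
          unfold pvEditLast
          cases hnb : pvHeadAlpha rest' with
          | false =>
              simp only [Bool.false_eq_true, if_neg, reduceIte, pvStep]
              cases LEETSPEAK_MAP.lookup x <;> simp
          | true =>
              simp only [if_pos, reduceIte, List.getLast?_singleton, pvStep]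
              cases hlk : LEETSPEAK_MAP.lookup x <;> simp [hlk]
      | cons y l' =>
          have hy : PySem.Chars.isalpha y = false := hall y (by simp)
          have ihy := ih rest' (by intro z hz; exact hall z (by simp [hz]))
          simp only [List.cons_append, pvGo, hx] at ihy ⊢
          rw [ihy]
          have hstep : pvStep false x (pvHeadAlpha (y :: (l' ++ rest'))) = x := by
            simp only [pvHeadAlpha, hy, pvStep]
            cases LEETSPEAK_MAP.lookup x <;> simp
          rw [hstep]
          have hEL : pvEditLast (pvHeadAlpha rest') (x :: y :: l') =
              x :: pvEditLast (pvHeadAlpha rest') (y :: l') := by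
            unfold pvEditLast
            cases pvHeadAlpha rest' with
            | false => simp
            | true =>
                simp only [if_pos, reduceIte, List.getLast?_cons_cons]
                cases hgl : (y :: l').getLast? with
                | none => simp at hgl
                | some lc =>
                    cases hlk2 : List.lookup lc LEETSPEAK_MAP <;>
                      simp [hlk2, List.dropLast_cons₂]
          rw [hEL]
          simp

-- alpha run: pvGo copies it and threads prev = true
theorem go_alpha_run : ∀ (run : List Char) (c : Char) (prev : Bool) (rest' : List Char),
    PySem.Chars.isalpha c = true → (∀ x ∈ run, PySem.Chars.isalpha x = true) →
    pvGo prev (c :: (run ++ rest')) = (c :: run) ++ pvGo true rest' := by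
  intro run
  induction run with
  | nil =>
      intro c prev rest' hc _
      simp only [List.nil_append, pvGo, hc]
      simp [pvStep, lk_alpha_none c hc]
  | cons d run' ih =>
      intro c prev rest' hc hall
      have hd : PySem.Chars.isalpha d = true := hall d (by simp)
      have hih := ih d (PySem.Chars.isalpha c) rest' hd (by intro z hz; exact hall z (by simp [hz]))
      simp only [List.cons_append] at hih ⊢
      rw [pvGo_cons, hih]
      have h1 : pvHeadAlpha (d :: (run' ++ rest')) = true := by simp [pvHeadAlpha, hd]
      rw [h1]
      have h2 : pvStep prev c true = c := by simp [pvStep, lk_alpha_none c hc]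
      rw [h2]

theorem pvEditLast_cons (nb : Bool) (x y : Char) (l : List Char) :
    pvEditLast nb (x :: y :: l) = x :: pvEditLast nb (y :: l) := by
  unfold pvEditLast
  cases nb with
  | false => simp
  | true =>
      simp only [if_pos, reduceIte, List.getLast?_cons_cons]
      cases hgl : (y :: l).getLast? with
      | none => simp at hgl
      | some lc =>
          cases hlk2 : List.lookup lc LEETSPEAK_MAP <;>
            simp [hlk2, List.dropLast_cons₂]

theorem pvEditLast_singleton (nb nf : Bool) (c : Char) :
    pvEditLast nb
      (if nf then
         (match LEETSPEAK_MAP.lookup c with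
          | some r => r :: ([] : List Char)
          | none => c :: ([] : List Char))
       else c :: []) = [pvStep nf c nb] := by
  cases hlk : LEETSPEAK_MAP.lookup c with
  | none =>
      unfold pvEditLast pvStep
      rw [hlk]
      cases nf <;> cases nb <;> simp [hlk]
  | some r =>
      have hrn : LEETSPEAK_MAP.lookup r = none :=
        lk_alpha_none r (lk_some_alpha c r hlk)
      unfold pvEditLast pvStep
      rw [hlk]
      cases nf <;> cases nb <;> simp [hlk, hrn]

theorem chunk_isEmpty (xs : List Char) : (pvLeetChunk xs).isEmpty = xs.isEmpty := by
  cases xs with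
  | nil => simp [pvLeetChunk]
  | cons c rest => rw [pvLeetChunk]; rfl

theorem headAlpha_dropWhile (c : Char) (rest : List Char) (hc : PySem.Chars.isalpha c = false) :
    pvHeadAlpha (rest.dropWhile (fun d => PySem.Chars.isalpha d == PySem.Chars.isalpha c)) =
      !(rest.dropWhile (fun d => PySem.Chars.isalpha d == PySem.Chars.isalpha c)).isEmpty := by
  have h := List.head?_dropWhile_not (fun d => PySem.Chars.isalpha d == PySem.Chars.isalpha c) rest
  cases hd : (rest.dropWhile (fun d => PySem.Chars.isalpha d == PySem.Chars.isalpha c)) with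
  | nil => simp [pvHeadAlpha]
  | cons d tl =>
      rw [hd] at h
      simp only [List.head?_cons] at h
      simp only [hc, beq_eq_false_iff_ne, ne_eq, Bool.not_eq_false] at h
      simp [pvHeadAlpha, h]

-- main segment lemma
theorem go_eq_E_chunk : ∀ (cs : List Char) (nf prev : Bool),
    (cs = [] ∨ prev = nf ∨ pvHeadAlpha cs = true) →
    pvGo prev cs = pvE nf (pvLeetChunk cs) := by
  intro cs
  induction cs using pvLeetChunk.induct with
  | case1 => intro nf prev _; simp [pvLeetChunk, pvGo, pvE]
  | case2 c rest ih =>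
      intro nf prev hcond
      rw [pvLeetChunk, pvE_cons']
      have hsplit : rest.takeWhile (fun d => PySem.Chars.isalpha d == PySem.Chars.isalpha c) ++
          rest.dropWhile (fun d => PySem.Chars.isalpha d == PySem.Chars.isalpha c) = rest :=
        List.takeWhile_append_dropWhile
      set run := rest.takeWhile (fun d => PySem.Chars.isalpha d == PySem.Chars.isalpha c) with hrun_def
      set rest' := rest.dropWhile (fun d => PySem.Chars.isalpha d == PySem.Chars.isalpha c) with hrest'_def
      have hrun : ∀ x ∈ run, PySem.Chars.isalpha x = PySem.Chars.isalpha c := by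
        intro x hx
        have := List.mem_takeWhile_imp hx
        simpa using this
      by_cases hc : PySem.Chars.isalpha c = true
      · -- alpha run: copied wholesale, prev becomes true
        have hgo : pvGo prev (c :: rest) = (c :: run) ++ pvGo true rest' := by
          rw [← hsplit]
          exact go_alpha_run run c prev rest' hc (fun x hx => (hrun x hx).trans hc)
        rw [hgo, if_pos hc]
        congr 1
        exact ih true true (Or.inr (Or.inl rfl))
      · -- non-alpha run: only first/last char can be edited
        simp only [Bool.not_eq_true] at hc
        have hprev : prev = nf := by
          rcases hcond with h | h | h
          · cases h
          · exact h
          · rw [pvHeadAlpha] at h; rw [h] at hc; cases hc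
        subst hprev
        have hnb : pvHeadAlpha rest' = !rest'.isEmpty := headAlpha_dropWhile c rest hc
        have hIH : pvGo false rest' = pvE true (pvLeetChunk rest') := by
          apply ih
          cases hrest'c : rest' with
          | nil => exact Or.inl rfl
          | cons d tl =>
              refine Or.inr (Or.inr ?_)
              rw [← hrest'c, hnb, hrest'c]
              simp
        rw [if_neg (by simp [hc]), chunk_isEmpty, ← hnb]
        cases hrunc : run with
        | nil =>
            -- one-character run
            have hre : rest = rest' := by rw [← hsplit, hrunc, List.nil_append]
            rw [← hre] at hIH hnb ⊢
            rw [pvGo_cons, hc, hIH,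
              pvEditLast_singleton (pvHeadAlpha rest) prev c]
            simp
        | cons r0 run' =>
            have hr0 : PySem.Chars.isalpha r0 = false := by
              have := hrun r0 (by rw [hrunc]; simp)
              rw [this, hc]
            have hmid : pvGo false (run ++ rest') =
                pvEditLast (pvHeadAlpha rest') run ++ pvGo false rest' := by
              apply go_nonalpha_mid
              intro x hx
              rw [hrun x hx, hc]
            rw [show (c :: rest) = c :: (run ++ rest') from by rw [hsplit]]
            rw [pvGo_cons]
            have hha : pvHeadAlpha (run ++ rest') = false := by
              rw [hrunc]; simp [pvHeadAlpha, hr0]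
            rw [hha, hc, hmid, hIH, hrunc]
            cases hlk : LEETSPEAK_MAP.lookup c with
            | none =>
                have h1 : (if prev = true then
                    (match (none : Option Char) with
                     | some r => r :: r0 :: run'
                     | none => c :: r0 :: run')
                  else c :: r0 :: run') = c :: r0 :: run' := by
                  cases prev <;> simp
                rw [h1, pvEditLast_cons,
                  show pvStep prev c false = c from by simp [pvStep, hlk]]
                simp
            | some r =>
                have h1 : (if prev = true then
                    (match (some r : Option Char) with
                     | some r => r :: r0 :: run'
                     | none => c :: r0 :: run')
                  else c :: r0 :: run') = (if prev then r else c) :: r0 :: run' := by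
                  cases prev <;> simp
                rw [h1, pvEditLast_cons,
                  show pvStep prev c false = (if prev then r else c) from by
                    simp [pvStep, hlk]]
                simp

-- ===== VERDICT (by name: the statement is the Claim_ definition above) =====
theorem replace_leetspeak_py_spec : Claim_equal_replace_leetspeak_py := by
  intro text _
  show replace_leetspeak_py text = replace_leetspeak_py_alt text
  have hA : replace_leetspeak_py text = String.ofList (pvGo false text.toList) := by
    unfold replace_leetspeak_py
    simp only []
    rw [aFold_eq_map text.toList, List.nil_append, A_map_eq_go]
  have hB : replace_leetspeak_py_alt text =
      String.ofList (pvE false (pvLeetChunk text.toList)) := by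
    unfold replace_leetspeak_py_alt
    simp only []
    have h := B_enum_eq_E (pvLeetChunk text.toList) 0
      (((pvLeetChunk text.toList).length : Int) - 1) (by push_cast; ring)
    rw [Nat.cast_zero] at h
    rw [h]
    rfl
  rw [hA, hB, go_eq_E_chunk text.toList false false (Or.inr (Or.inl rfl))]
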